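-- pv_equiv track=rewrite | github.com/qdtiger/data-mining | codes/feature.py | convert_last_comments
-- ===== SOURCE A (Python) =====
-- comment_date = ["2016-02-01", "2016-02-08", "2016-02-15", "2016-02-22", "2016-02-29", "2016-03-07", "2016-03-14",
--                 "2016-03-21", "2016-03-28",
--                 "2016-04-04", "2016-04-11", "2016-04-15"]
--
-- def convert_last_comments(time):
--     comment_date_end = time[0:10]
--     comment_date_begin = comment_date[0]
--     for date in reversed(comment_date):
--         if date < comment_date_end:
--             comment_date_begin = date
--             break
--     return comment_date_begin
-- ===== SOURCE B (Python) =====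
-- comment_date = ["2016-02-01", "2016-02-08", "2016-02-15", "2016-02-22", "2016-02-29", "2016-03-07", "2016-03-14",
--                 "2016-03-21", "2016-03-28",
--                 "2016-04-04", "2016-04-11", "2016-04-15"]
--
-- def convert_last_comments(time):
--     key = time[0:10]
--     # bisect_left on the (ascending, duplicate-free) constant list
--     lo, hi = 0, len(comment_date)
--     while lo < hi:
--         mid = (lo + hi) // 2
--         if comment_date[mid] < key:
--             lo = mid + 1
--         else:
--             hi = mid
--     return comment_date[lo - 1] if lo else comment_date[0]
-- ===== Notes on version B (the rewrite author's own statement) =====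
-- stated objective: alternative
-- what changed: Replaces A's reverse linear scan with break by a hand-rolled bisect_left binary search over the sorted constant date list, returning the element before the insertion point (or the first element when none is smaller).
import Mathlib
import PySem

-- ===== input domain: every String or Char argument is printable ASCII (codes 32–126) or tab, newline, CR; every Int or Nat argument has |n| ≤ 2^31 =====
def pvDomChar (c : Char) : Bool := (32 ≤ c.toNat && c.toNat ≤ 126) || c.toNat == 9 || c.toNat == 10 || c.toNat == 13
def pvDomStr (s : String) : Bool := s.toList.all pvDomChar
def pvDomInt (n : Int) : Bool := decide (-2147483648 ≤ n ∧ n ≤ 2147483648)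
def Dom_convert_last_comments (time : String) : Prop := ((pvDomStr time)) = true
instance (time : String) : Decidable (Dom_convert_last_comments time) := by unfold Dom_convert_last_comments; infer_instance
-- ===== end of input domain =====

-- B replaces A's reverse linear scan over the constant date list with a bisect_left
-- binary search (alternative decomposition; same exact return value).
-- B replaces A's reverse linear scan over the constant date list with a bisect_left
-- binary search (alternative decomposition; same exact return value).
-- ===== PORT A =====
def pvCommentDate : List String := ["2016-02-01", "2016-02-08", "2016-02-15", "2016-02-22", "2016-02-29", "2016-03-07", "2016-03-14", "2016-03-21", "2016-03-28", "2016-04-04", "2016-04-11", "2016-04-15"]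

def pvScanA : List String → List Char → String → String
  | [], _, acc => acc
  | d :: rest, e, acc => if d.toList < e then d else pvScanA rest e acc

def convert_last_comments (time : String) : String :=
  let e := (PySem.Str.slice time (some 0) (some 10)).toList
  pvScanA pvCommentDate.reverse e (pvCommentDate.getD 0 "")

-- ===== PORT B =====
def pvDates : List String := ["2016-02-01", "2016-02-08", "2016-02-15", "2016-02-22", "2016-02-29", "2016-03-07", "2016-03-14", "2016-03-21", "2016-03-28", "2016-04-04", "2016-04-11", "2016-04-15"]

def pvBisect (lo hi : Nat) (key : List Char) : Nat :=
  if _h : lo < hi then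
    let mid := (lo + hi) / 2
    if (pvDates.getD mid "").toList < key then pvBisect (mid + 1) hi key
    else pvBisect lo mid key
  else lo
termination_by hi - lo
decreasing_by all_goals omega

def convert_last_comments_alt (time : String) : String :=
  let key := (PySem.Str.slice time (some 0) (some 10)).toList
  let lo := pvBisect 0 12 key
  if lo ≠ 0 then pvDates.getD (lo - 1) "" else pvDates.getD 0 ""

-- ===== PRECONDITION & SPEC =====
def Spec_convert_last_comments (time : String) (out : String) : Prop := out = convert_last_comments_alt time
instance (time : String) (out : String) : Decidable (Spec_convert_last_comments time out) := by unfold Spec_convert_last_comments; infer_instance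

-- ===== CLAIM (what is proved, stated in full; the proofs are below) =====
def Claim_equal_convert_last_comments : Prop := ∀ (time : String), Dom_convert_last_comments time → Spec_convert_last_comments time (convert_last_comments time)

-- ===== LEMMAS AND PROOFS =====

theorem pvMain (e : List Char) :
    pvScanA pvCommentDate.reverse e (pvCommentDate.getD 0 "") =
    (if pvBisect 0 12 e ≠ 0 then pvDates.getD (pvBisect 0 12 e - 1) "" else pvDates.getD 0 "") := by
  rw [show pvCommentDate.reverse = ["2016-04-15", "2016-04-11", "2016-04-04", "2016-03-28", "2016-03-21", "2016-03-14", "2016-03-07", "2016-02-29", "2016-02-22", "2016-02-15", "2016-02-08", "2016-02-01"] from by decide]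
  rw [show pvCommentDate.getD 0 "" = "2016-02-01" from rfl]
  by_cases h11 : (['2', '0', '1', '6', '-', '0', '4', '-', '1', '5'] : List Char) < e
  · have H0 : (['2', '0', '1', '6', '-', '0', '2', '-', '0', '1'] : List Char) < e := lt_trans (by decide) h11
    have H1 : (['2', '0', '1', '6', '-', '0', '2', '-', '0', '8'] : List Char) < e := lt_trans (by decide) h11
    have H2 : (['2', '0', '1', '6', '-', '0', '2', '-', '1', '5'] : List Char) < e := lt_trans (by decide) h11
    have H3 : (['2', '0', '1', '6', '-', '0', '2', '-', '2', '2'] : List Char) < e := lt_trans (by decide) h11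
    have H4 : (['2', '0', '1', '6', '-', '0', '2', '-', '2', '9'] : List Char) < e := lt_trans (by decide) h11
    have H5 : (['2', '0', '1', '6', '-', '0', '3', '-', '0', '7'] : List Char) < e := lt_trans (by decide) h11
    have H6 : (['2', '0', '1', '6', '-', '0', '3', '-', '1', '4'] : List Char) < e := lt_trans (by decide) h11
    have H7 : (['2', '0', '1', '6', '-', '0', '3', '-', '2', '1'] : List Char) < e := lt_trans (by decide) h11
    have H8 : (['2', '0', '1', '6', '-', '0', '3', '-', '2', '8'] : List Char) < e := lt_trans (by decide) h11
    have H9 : (['2', '0', '1', '6', '-', '0', '4', '-', '0', '4'] : List Char) < e := lt_trans (by decide) h11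
    have H10 : (['2', '0', '1', '6', '-', '0', '4', '-', '1', '1'] : List Char) < e := lt_trans (by decide) h11
    simp [pvScanA, pvBisect, pvDates, H6, H9, h11]
  by_cases h10 : (['2', '0', '1', '6', '-', '0', '4', '-', '1', '1'] : List Char) < e
  · have H0 : (['2', '0', '1', '6', '-', '0', '2', '-', '0', '1'] : List Char) < e := lt_trans (by decide) h10
    have H1 : (['2', '0', '1', '6', '-', '0', '2', '-', '0', '8'] : List Char) < e := lt_trans (by decide) h10
    have H2 : (['2', '0', '1', '6', '-', '0', '2', '-', '1', '5'] : List Char) < e := lt_trans (by decide) h10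
    have H3 : (['2', '0', '1', '6', '-', '0', '2', '-', '2', '2'] : List Char) < e := lt_trans (by decide) h10
    have H4 : (['2', '0', '1', '6', '-', '0', '2', '-', '2', '9'] : List Char) < e := lt_trans (by decide) h10
    have H5 : (['2', '0', '1', '6', '-', '0', '3', '-', '0', '7'] : List Char) < e := lt_trans (by decide) h10
    have H6 : (['2', '0', '1', '6', '-', '0', '3', '-', '1', '4'] : List Char) < e := lt_trans (by decide) h10
    have H7 : (['2', '0', '1', '6', '-', '0', '3', '-', '2', '1'] : List Char) < e := lt_trans (by decide) h10
    have H8 : (['2', '0', '1', '6', '-', '0', '3', '-', '2', '8'] : List Char) < e := lt_trans (by decide) h10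
    have H9 : (['2', '0', '1', '6', '-', '0', '4', '-', '0', '4'] : List Char) < e := lt_trans (by decide) h10
    simp [pvScanA, pvBisect, pvDates, H6, H9, h10, h11]
  by_cases h9 : (['2', '0', '1', '6', '-', '0', '4', '-', '0', '4'] : List Char) < e
  · have H0 : (['2', '0', '1', '6', '-', '0', '2', '-', '0', '1'] : List Char) < e := lt_trans (by decide) h9
    have H1 : (['2', '0', '1', '6', '-', '0', '2', '-', '0', '8'] : List Char) < e := lt_trans (by decide) h9
    have H2 : (['2', '0', '1', '6', '-', '0', '2', '-', '1', '5'] : List Char) < e := lt_trans (by decide) h9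
    have H3 : (['2', '0', '1', '6', '-', '0', '2', '-', '2', '2'] : List Char) < e := lt_trans (by decide) h9
    have H4 : (['2', '0', '1', '6', '-', '0', '2', '-', '2', '9'] : List Char) < e := lt_trans (by decide) h9
    have H5 : (['2', '0', '1', '6', '-', '0', '3', '-', '0', '7'] : List Char) < e := lt_trans (by decide) h9
    have H6 : (['2', '0', '1', '6', '-', '0', '3', '-', '1', '4'] : List Char) < e := lt_trans (by decide) h9
    have H7 : (['2', '0', '1', '6', '-', '0', '3', '-', '2', '1'] : List Char) < e := lt_trans (by decide) h9
    have H8 : (['2', '0', '1', '6', '-', '0', '3', '-', '2', '8'] : List Char) < e := lt_trans (by decide) h9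
    simp [pvScanA, pvBisect, pvDates, H6, h9, h10, h11]
  by_cases h8 : (['2', '0', '1', '6', '-', '0', '3', '-', '2', '8'] : List Char) < e
  · have H0 : (['2', '0', '1', '6', '-', '0', '2', '-', '0', '1'] : List Char) < e := lt_trans (by decide) h8
    have H1 : (['2', '0', '1', '6', '-', '0', '2', '-', '0', '8'] : List Char) < e := lt_trans (by decide) h8
    have H2 : (['2', '0', '1', '6', '-', '0', '2', '-', '1', '5'] : List Char) < e := lt_trans (by decide) h8
    have H3 : (['2', '0', '1', '6', '-', '0', '2', '-', '2', '2'] : List Char) < e := lt_trans (by decide) h8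
    have H4 : (['2', '0', '1', '6', '-', '0', '2', '-', '2', '9'] : List Char) < e := lt_trans (by decide) h8
    have H5 : (['2', '0', '1', '6', '-', '0', '3', '-', '0', '7'] : List Char) < e := lt_trans (by decide) h8
    have H6 : (['2', '0', '1', '6', '-', '0', '3', '-', '1', '4'] : List Char) < e := lt_trans (by decide) h8
    have H7 : (['2', '0', '1', '6', '-', '0', '3', '-', '2', '1'] : List Char) < e := lt_trans (by decide) h8
    simp [pvScanA, pvBisect, pvDates, H6, h8, h9, h10, h11]
  by_cases h7 : (['2', '0', '1', '6', '-', '0', '3', '-', '2', '1'] : List Char) < e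
  · have H0 : (['2', '0', '1', '6', '-', '0', '2', '-', '0', '1'] : List Char) < e := lt_trans (by decide) h7
    have H1 : (['2', '0', '1', '6', '-', '0', '2', '-', '0', '8'] : List Char) < e := lt_trans (by decide) h7
    have H2 : (['2', '0', '1', '6', '-', '0', '2', '-', '1', '5'] : List Char) < e := lt_trans (by decide) h7
    have H3 : (['2', '0', '1', '6', '-', '0', '2', '-', '2', '2'] : List Char) < e := lt_trans (by decide) h7
    have H4 : (['2', '0', '1', '6', '-', '0', '2', '-', '2', '9'] : List Char) < e := lt_trans (by decide) h7
    have H5 : (['2', '0', '1', '6', '-', '0', '3', '-', '0', '7'] : List Char) < e := lt_trans (by decide) h7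
    have H6 : (['2', '0', '1', '6', '-', '0', '3', '-', '1', '4'] : List Char) < e := lt_trans (by decide) h7
    simp [pvScanA, pvBisect, pvDates, H6, h7, h8, h9, h10, h11]
  by_cases h6 : (['2', '0', '1', '6', '-', '0', '3', '-', '1', '4'] : List Char) < e
  · have H0 : (['2', '0', '1', '6', '-', '0', '2', '-', '0', '1'] : List Char) < e := lt_trans (by decide) h6
    have H1 : (['2', '0', '1', '6', '-', '0', '2', '-', '0', '8'] : List Char) < e := lt_trans (by decide) h6
    have H2 : (['2', '0', '1', '6', '-', '0', '2', '-', '1', '5'] : List Char) < e := lt_trans (by decide) h6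
    have H3 : (['2', '0', '1', '6', '-', '0', '2', '-', '2', '2'] : List Char) < e := lt_trans (by decide) h6
    have H4 : (['2', '0', '1', '6', '-', '0', '2', '-', '2', '9'] : List Char) < e := lt_trans (by decide) h6
    have H5 : (['2', '0', '1', '6', '-', '0', '3', '-', '0', '7'] : List Char) < e := lt_trans (by decide) h6
    simp [pvScanA, pvBisect, pvDates, h6, h7, h8, h9, h10, h11]
  by_cases h5 : (['2', '0', '1', '6', '-', '0', '3', '-', '0', '7'] : List Char) < e
  · have H0 : (['2', '0', '1', '6', '-', '0', '2', '-', '0', '1'] : List Char) < e := lt_trans (by decide) h5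
    have H1 : (['2', '0', '1', '6', '-', '0', '2', '-', '0', '8'] : List Char) < e := lt_trans (by decide) h5
    have H2 : (['2', '0', '1', '6', '-', '0', '2', '-', '1', '5'] : List Char) < e := lt_trans (by decide) h5
    have H3 : (['2', '0', '1', '6', '-', '0', '2', '-', '2', '2'] : List Char) < e := lt_trans (by decide) h5
    have H4 : (['2', '0', '1', '6', '-', '0', '2', '-', '2', '9'] : List Char) < e := lt_trans (by decide) h5
    simp [pvScanA, pvBisect, pvDates, H3, h5, h6, h7, h8, h9, h10, h11]
  by_cases h4 : (['2', '0', '1', '6', '-', '0', '2', '-', '2', '9'] : List Char) < e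
  · have H0 : (['2', '0', '1', '6', '-', '0', '2', '-', '0', '1'] : List Char) < e := lt_trans (by decide) h4
    have H1 : (['2', '0', '1', '6', '-', '0', '2', '-', '0', '8'] : List Char) < e := lt_trans (by decide) h4
    have H2 : (['2', '0', '1', '6', '-', '0', '2', '-', '1', '5'] : List Char) < e := lt_trans (by decide) h4
    have H3 : (['2', '0', '1', '6', '-', '0', '2', '-', '2', '2'] : List Char) < e := lt_trans (by decide) h4
    simp [pvScanA, pvBisect, pvDates, H3, h4, h5, h6, h7, h8, h9, h10, h11]
  by_cases h3 : (['2', '0', '1', '6', '-', '0', '2', '-', '2', '2'] : List Char) < e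
  · have H0 : (['2', '0', '1', '6', '-', '0', '2', '-', '0', '1'] : List Char) < e := lt_trans (by decide) h3
    have H1 : (['2', '0', '1', '6', '-', '0', '2', '-', '0', '8'] : List Char) < e := lt_trans (by decide) h3
    have H2 : (['2', '0', '1', '6', '-', '0', '2', '-', '1', '5'] : List Char) < e := lt_trans (by decide) h3
    simp [pvScanA, pvBisect, pvDates, h3, h4, h5, h6, h7, h8, h9, h10, h11]
  by_cases h2 : (['2', '0', '1', '6', '-', '0', '2', '-', '1', '5'] : List Char) < e
  · have H0 : (['2', '0', '1', '6', '-', '0', '2', '-', '0', '1'] : List Char) < e := lt_trans (by decide) h2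
    have H1 : (['2', '0', '1', '6', '-', '0', '2', '-', '0', '8'] : List Char) < e := lt_trans (by decide) h2
    simp [pvScanA, pvBisect, pvDates, H1, h2, h3, h4, h5, h6, h7, h8, h9, h10, h11]
  by_cases h1 : (['2', '0', '1', '6', '-', '0', '2', '-', '0', '8'] : List Char) < e
  · have H0 : (['2', '0', '1', '6', '-', '0', '2', '-', '0', '1'] : List Char) < e := lt_trans (by decide) h1
    simp [pvScanA, pvBisect, pvDates, h1, h2, h3, h4, h5, h6, h7, h8, h9, h10, h11]
  by_cases h0 : (['2', '0', '1', '6', '-', '0', '2', '-', '0', '1'] : List Char) < e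
  · simp [pvScanA, pvBisect, pvDates, h0, h1, h2, h3, h4, h5, h6, h7, h8, h9, h10, h11]
  simp [pvScanA, pvBisect, pvDates, h0, h1, h2, h3, h4, h5, h6, h7, h8, h9, h10, h11]

-- ===== VERDICT (by name: the statement is the Claim_ definition above) =====
theorem convert_last_comments_spec : Claim_equal_convert_last_comments := by
  intro time _
  unfold Spec_convert_last_comments convert_last_comments convert_last_comments_alt
  exact pvMain _
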